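-- pv_equiv track=rewrite | github.com/NoahCLR/charybdis-4x6 | via layouts/via_to_qmk_layout.py | format_group
-- ===== SOURCE A (Python) =====
-- COL_WIDTH = 17  # "ideal" width per key
--
-- MIN_PAD = 1  # minimum spaces in front of a token
--
-- def format_group(tokens, cols):
--     """
--     Format a group of `cols` tokens so that:
--     - normally each field is COL_WIDTH wide, separated by ", "
--     - if some token is longer than COL_WIDTH, we shrink left padding
--       (down to MIN_PAD) so that the final comma still lines up,
--       if possible.
--     """
--     assert len(tokens) == cols
--     lengths = [len(t) for t in tokens]
--
--     pads = [max(COL_WIDTH - length, MIN_PAD) for length in lengths]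
--     target = cols * COL_WIDTH + 2 * (cols - 1)
--     current = sum(pads[i] + lengths[i] for i in range(cols)) + 2 * (cols - 1)
--     overflow = current - target
--
--     while overflow > 0 and any(p > MIN_PAD for p in pads):
--         for i in range(cols):
--             if pads[i] > MIN_PAD:
--                 pads[i] -= 1
--                 overflow -= 1
--                 if overflow <= 0:
--                     break
--
--     fields = [" " * pads[i] + tokens[i] for i in range(cols)]
--     return ", ".join(fields)
-- ===== SOURCE B (Python) =====
-- COL_WIDTH = 17  # "ideal" width per key
--
-- MIN_PAD = 1  # minimum spaces in front of a token
--
-- def format_group(tokens, cols):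
--     """
--     Same output as the round-robin version, but the pad shrinking is
--     computed in closed form: q full rounds of shrinking plus a partial
--     round over the first `rem` still-shrinkable columns.
--     """
--     assert len(tokens) == cols
--     # capacity of each column to give up padding, and the total overflow
--     caps = [max(COL_WIDTH - MIN_PAD - len(t), 0) for t in tokens]
--     overflow = sum(max(len(t) - (COL_WIDTH - MIN_PAD), 0) for t in tokens)
--     if overflow >= sum(caps):
--         cuts = caps  # every pad collapses to MIN_PAD
--     else:
--         # largest q with sum(min(q, cap)) <= overflow; caps <= COL_WIDTH-MIN_PAD
--         q = 0
--         for qq in range(COL_WIDTH):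
--             if sum(min(qq, c) for c in caps) <= overflow:
--                 q = qq
--         rem = overflow - sum(min(q, c) for c in caps)
--         cuts = []
--         for c in caps:
--             bonus = 1 if rem > 0 and c > q else 0
--             rem -= bonus
--             cuts.append(min(q, c) + bonus)
--     fields = [" " * (max(COL_WIDTH - len(t), MIN_PAD) - cut) + t
--               for t, cut in zip(tokens, cuts)]
--     return ", ".join(fields)
-- ===== Notes on version B (the rewrite author's own statement) =====
-- stated objective: alternative
-- what changed: Replaces A's round-robin while loop that decrements pads one space at a time by a closed-form distribution: q full shrink rounds found by a bounded scan of sum(min(q,cap)), plus one partial round over the first rem still-shrinkable columns.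
import Mathlib
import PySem

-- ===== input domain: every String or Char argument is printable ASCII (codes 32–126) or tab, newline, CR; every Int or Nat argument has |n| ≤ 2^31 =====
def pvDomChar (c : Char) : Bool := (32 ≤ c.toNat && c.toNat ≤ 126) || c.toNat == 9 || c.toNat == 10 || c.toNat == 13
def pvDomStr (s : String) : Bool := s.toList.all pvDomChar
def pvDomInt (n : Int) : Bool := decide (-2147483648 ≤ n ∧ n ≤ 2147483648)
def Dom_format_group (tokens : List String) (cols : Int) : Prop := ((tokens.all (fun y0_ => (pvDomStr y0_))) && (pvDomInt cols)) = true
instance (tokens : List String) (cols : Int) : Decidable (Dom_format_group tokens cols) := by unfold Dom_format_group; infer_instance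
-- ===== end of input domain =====

-- B replaces A's round-robin while loop by a closed-form distribution of the
-- overflow (q full rounds plus a partial round over the first rem columns);
-- objective: alternative (same asymptotic cost, loop-free pad computation).

-- ===== PORT A =====

-- one pass of A's `for i in range(cols)` loop over the remaining pads,
-- carrying overflow; break (`if overflow <= 0`) leaves the tail untouched
def forPass : List Int → Int → List Int × Int
  | [], o => ([], o)
  | p :: ps, o =>
      if 1 < p then
        if o - 1 ≤ 0 then ((p - 1) :: ps, o - 1)
        else
          let r := forPass ps (o - 1)
          ((p - 1) :: r.1, r.2)
      else
        let r := forPass ps o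
        (p :: r.1, r.2)

def padsMeasure (pads : List Int) : Nat := (pads.map (fun p => (p - 1).toNat)).sum

theorem forPass_measure_le (pads : List Int) (o : Int) :
    padsMeasure (forPass pads o).1 ≤ padsMeasure pads := by
  induction pads generalizing o with
  | nil => simp [forPass]
  | cons p ps ih =>
    simp only [forPass, padsMeasure, List.map, List.sum_cons]
    split_ifs with h1 h2
    · simp only [List.map, List.sum_cons]; omega
    · have := ih (o - 1)
      simp only [padsMeasure] at this
      simp only [List.map, List.sum_cons]; omega
    · have := ih o
      simp only [padsMeasure] at this
      simp only [List.map, List.sum_cons]; omega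

theorem forPass_measure_lt (pads : List Int) (o : Int) (ho : 0 < o)
    (hp : ∃ p ∈ pads, 1 < p) :
    padsMeasure (forPass pads o).1 < padsMeasure pads := by
  induction pads generalizing o with
  | nil => simp at hp
  | cons p ps ih =>
    simp only [forPass, padsMeasure, List.map, List.sum_cons]
    split_ifs with h1 h2
    · simp only [List.map, List.sum_cons]; omega
    · have := forPass_measure_le ps (o - 1)
      simp only [padsMeasure] at this
      simp only [List.map, List.sum_cons]; omega
    · obtain ⟨q, hq, hq1⟩ := hp
      rcases List.mem_cons.mp hq with hq | hq
      · omega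
      · have := ih o ho ⟨q, hq, hq1⟩
        simp only [padsMeasure] at this
        simp only [List.map, List.sum_cons]; omega

-- A's `while overflow > 0 and any(p > MIN_PAD for p in pads)` loop
def whileA (pads : List Int) (overflow : Int) : List Int :=
  if h : 0 < overflow ∧ pads.any (fun p => decide (1 < p)) then
    whileA (forPass pads overflow).1 (forPass pads overflow).2
  else pads
termination_by padsMeasure pads
decreasing_by
  exact forPass_measure_lt pads overflow h.1 (by simpa using h.2)

-- " " * n + t is ported as the character list replicate glued to the token
def format_group (tokens : List String) (cols : Int) : String :=
  if _h : (tokens.length : Int) = cols then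
    let lengths := tokens.map PySem.Str.len
    let pads := lengths.map (fun l => max (17 - l) 1)
    let target := cols * 17 + 2 * (cols - 1)
    let current := ((PySem.List.pyRange 0 cols 1).map
        (fun i => PySem.List.pyGetD pads i 0 + PySem.List.pyGetD lengths i 0)).sum
        + 2 * (cols - 1)
    let overflow := current - target
    let pads' := whileA pads overflow
    let fields := (PySem.List.pyRange 0 cols 1).map
        (fun i => String.mk (PySem.List.pyRepeat [' '] (PySem.List.pyGetD pads' i 0))
                    ++ PySem.List.pyGetD tokens i "")
    PySem.Str.join ", " fields
  else ""  -- assert fails (AssertionError): outside Pre_format_group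

-- ===== PORT B =====

-- B's final for-loop: cut = min(q, c) (+1 for the first rem columns with c > q)
def bAssign : List Int → Int → Int → List Int
  | [], _, _ => []
  | c :: cs, q, rem =>
      let bonus : Int := if 0 < rem ∧ q < c then 1 else 0
      (min q c + bonus) :: bAssign cs q (rem - bonus)

-- B's closed-form cut distribution
def bCuts (caps : List Int) (overflow : Int) : List Int :=
  if caps.sum ≤ overflow then caps
  else
    let q := (PySem.List.pyRange 0 17 1).foldl
        (fun acc qq => if (caps.map (fun c => min qq c)).sum ≤ overflow then qq else acc) 0
    let rem := overflow - (caps.map (fun c => min q c)).sum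
    bAssign caps q rem

def format_group_alt (tokens : List String) (cols : Int) : String :=
  if _h : (tokens.length : Int) = cols then
    let caps := tokens.map (fun t => max (17 - 1 - PySem.Str.len t) 0)
    let overflow := (tokens.map (fun t => max (PySem.Str.len t - (17 - 1)) 0)).sum
    let cuts := bCuts caps overflow
    let fields := (tokens.zip cuts).map
        (fun tc => String.mk (PySem.List.pyRepeat [' '] (max (17 - PySem.Str.len tc.1) 1 - tc.2))
                     ++ tc.1)
    PySem.Str.join ", " fields
  else ""  -- assert fails: outside Pre_format_group

-- ===== PRECONDITION & SPEC =====

-- A's assert raises AssertionError unless len(tokens) == cols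
def Pre_format_group (tokens : List String) (cols : Int) : Prop :=
  (tokens.length : Int) = cols
instance (tokens : List String) (cols : Int) : Decidable (Pre_format_group tokens cols) := by
  unfold Pre_format_group; infer_instance

def pvWitness_format_group : List String × Int := (["alpha", "x"], 2)

def Spec_format_group (tokens : List String) (cols : Int) (out : String) : Prop := out = format_group_alt tokens cols
instance (tokens : List String) (cols : Int) (out : String) : Decidable (Spec_format_group tokens cols out) := by unfold Spec_format_group; infer_instance

-- ===== CLAIM (what is proved, stated in full; the proofs are below) =====
def Claim_equal_format_group : Prop := ∀ (tokens : List String) (cols : Int), Dom_format_group tokens cols → Pre_format_group tokens cols → Spec_format_group tokens cols (format_group tokens cols)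

-- ===== LEMMAS AND PROOFS =====

-- S(q) = sum(min(q, c) for c in caps)
def sCap (caps : List Int) (q : Int) : Int := (caps.map (fun c => min q c)).sum

-- the marks of one pass of A's loop, in cap space: 1 for the first r columns with c > 0
def markC : List Int → Int → List Int
  | [], _ => []
  | c :: cs, r => if 0 < r ∧ 0 < c then 1 :: markC cs (r - 1) else 0 :: markC cs r

def kPos (caps : List Int) : Int := (caps.countP (fun c => decide (0 < c)) : Int)

theorem sCap_mono (caps : List Int) {q1 q2 : Int} (h : q1 ≤ q2) :
    sCap caps q1 ≤ sCap caps q2 := by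
  induction caps with
  | nil => simp [sCap]
  | cons c cs ih => simp only [sCap, List.map, List.sum_cons] at *; omega

theorem sCap_top (caps : List Int) (h : ∀ c ∈ caps, c ≤ 16) : sCap caps 16 = caps.sum := by
  induction caps with
  | nil => simp [sCap]
  | cons c cs ih =>
    simp only [sCap, List.map, List.sum_cons] at *
    have hc := h c (by simp)
    have := ih (fun c hc => h c (by simp [hc]))
    omega

theorem sCap_one (caps : List Int) (h : ∀ c ∈ caps, 0 ≤ c) : sCap caps 1 = kPos caps := by
  induction caps with
  | nil => simp [sCap, kPos]
  | cons c cs ih =>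
    have hc := h c (by simp)
    have := ih (fun c hc => h c (by simp [hc]))
    simp only [sCap, kPos, List.map, List.sum_cons, List.countP_cons] at *
    by_cases h0 : 0 < c <;> simp [h0] <;> omega

theorem sCap_unique (caps : List Int) (o q1 q2 : Int)
    (h1a : sCap caps q1 ≤ o) (h1b : ¬ sCap caps (q1 + 1) ≤ o)
    (h2a : sCap caps q2 ≤ o) (h2b : ¬ sCap caps (q2 + 1) ≤ o) : q1 = q2 := by
  by_contra hne
  rcases lt_or_gt_of_ne hne with h | h
  · exact h1b (le_trans (sCap_mono caps (by omega)) h2a)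
  · exact h2b (le_trans (sCap_mono caps (by omega)) h1a)

-- scan characterization: the fold computes the last (= largest) qualifying q
theorem scan_char (caps : List Int) (o : Int) :
    ∀ (n : Nat), sCap caps 0 ≤ o → ¬ sCap caps (n : Int) ≤ o →
    0 ≤ (((List.range (n + 1)).map (fun i => (i : Int))).foldl
          (fun acc x => if sCap caps x ≤ o then x else acc) 0) ∧
    sCap caps (((List.range (n + 1)).map (fun i => (i : Int))).foldl
          (fun acc x => if sCap caps x ≤ o then x else acc) 0) ≤ o ∧
    ¬ sCap caps ((((List.range (n + 1)).map (fun i => (i : Int))).foldl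
          (fun acc x => if sCap caps x ≤ o then x else acc) 0) + 1) ≤ o := by
  intro n
  induction n with
  | zero => intro h0 hf; exact absurd (by exact_mod_cast h0) hf
  | succ n ih =>
    intro h0 hf
    have hdecomp : ((List.range (n + 1 + 1)).map (fun i => (i : Int))) =
        ((List.range (n + 1)).map (fun i => (i : Int))) ++ [((n + 1 : Nat) : Int)] := by
      rw [List.range_succ]; simp
    rw [hdecomp, List.foldl_append]
    simp only [List.foldl_cons, List.foldl_nil]
    rw [if_neg hf]
    by_cases hn : sCap caps (n : Int) ≤ o
    · have hdecomp2 : ((List.range (n + 1)).map (fun i => (i : Int))) =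
          ((List.range n).map (fun i => (i : Int))) ++ [(n : Int)] := by
        rw [List.range_succ]; simp
      rw [hdecomp2, List.foldl_append]
      simp only [List.foldl_cons, List.foldl_nil]
      rw [if_pos hn]
      refine ⟨by positivity, hn, ?_⟩
      have : ((n : Int) + 1) = ((n + 1 : Nat) : Int) := by push_cast; ring
      rw [this]; exact hf
    · exact ih h0 hn

theorem bAssign_length (caps : List Int) (q rem : Int) :
    (bAssign caps q rem).length = caps.length := by
  induction caps generalizing rem with
  | nil => simp [bAssign]
  | cons c cs ih => simp [bAssign, ih]

theorem bCuts_length (caps : List Int) (o : Int) : (bCuts caps o).length = caps.length := by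
  unfold bCuts; split_ifs <;> simp [bAssign_length]

theorem markC_length (caps : List Int) (r : Int) : (markC caps r).length = caps.length := by
  induction caps generalizing r with
  | nil => simp [markC]
  | cons c cs ih => simp only [markC]; split_ifs <;> simp [ih]

theorem zipWith_sub_replicate_zero (ps : List Int) :
    List.zipWith (fun p m => p - m) ps (List.replicate ps.length 0) = ps := by
  induction ps with
  | nil => simp
  | cons p ps ih => simp [List.replicate_succ, ih]

-- one pass of A's loop = subtract the marks, consume min(o, k) overflow
theorem kPos_cons (c : Int) (cs : List Int) :
    kPos (c :: cs) = (if 0 < c then 1 else 0) + kPos cs := by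
  simp only [kPos, List.countP_cons, decide_eq_true_eq]
  split_ifs <;> push_cast <;> omega

theorem markC_nonpos (caps : List Int) (r : Int) (hr : r ≤ 0) :
    markC caps r = List.replicate caps.length 0 := by
  induction caps generalizing r with
  | nil => simp [markC]
  | cons c cs ih => simp only [markC]; rw [if_neg (by omega)]; simp [ih _ hr, List.replicate_succ]

theorem forPass_eq (pads : List Int) (o : Int) (ho : 0 < o) :
    forPass pads o =
      (List.zipWith (fun p m => p - m) pads (markC (pads.map (fun p => p - 1)) o),
       o - min o (kPos (pads.map (fun p => p - 1)))) := by
  induction pads generalizing o with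
  | nil => simp [forPass, markC, kPos]; omega
  | cons p ps ih =>
    have hk : (0 : Int) ≤ kPos (ps.map (fun p => p - 1)) := Int.natCast_nonneg _
    simp only [List.map_cons, kPos_cons]
    by_cases h1 : 1 < p
    · have hcond : (0 : Int) < o ∧ (0 : Int) < p - 1 := ⟨ho, by omega⟩
      rw [if_pos (show (0:Int) < p - 1 by omega)]
      by_cases h2 : o - 1 ≤ 0
      · have ho1 : o = 1 := by omega
        subst ho1
        simp only [forPass, if_pos h1, if_pos h2, markC, if_pos hcond,
          List.zipWith_cons_cons]
        rw [markC_nonpos _ _ (by omega)]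
        simp only [List.length_map]
        rw [zipWith_sub_replicate_zero]
        exact Prod.ext rfl (by omega)
      · have ho1 : (0 : Int) < o - 1 := by omega
        simp only [forPass, if_pos h1, if_neg h2, markC, if_pos hcond,
          List.zipWith_cons_cons]
        rw [ih (o - 1) ho1]
        exact Prod.ext rfl (by dsimp only; omega)
    · have hcond : ¬ ((0 : Int) < o ∧ (0 : Int) < p - 1) := by omega
      rw [if_neg (show ¬ (0:Int) < p - 1 by omega)]
      simp only [forPass, if_neg h1, markC, if_neg hcond, List.zipWith_cons_cons]
      rw [ih o ho]
      exact Prod.ext (by norm_num) (by dsimp only; omega)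



theorem markC_ge (caps : List Int) (r : Int) (hr : kPos caps ≤ r) :
    markC caps r = caps.map (fun c => if 0 < c then 1 else 0) := by
  induction caps generalizing r with
  | nil => simp [markC]
  | cons c cs ih =>
    simp only [kPos, List.countP_cons] at hr
    by_cases h0 : 0 < c
    · simp only [h0, decide_true, if_true] at hr
      have hr' : (0 : Int) < r := by push_cast at hr; omega
      simp only [markC, if_pos (And.intro hr' h0), List.map, if_pos h0]
      rw [ih (r - 1) (by simp only [kPos]; push_cast at hr ⊢; omega)]
    · simp only [h0, decide_false, if_false] at hr
      simp only [markC, List.map, if_neg h0]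
      rw [if_neg (by tauto)]
      rw [ih r (by simp only [kPos]; push_cast at hr ⊢; omega)]

theorem bAssign_rem_nonpos (caps : List Int) (q rem : Int) (h : rem ≤ 0) :
    bAssign caps q rem = caps.map (fun c => min q c) := by
  induction caps generalizing rem with
  | nil => simp [bAssign]
  | cons c cs ih =>
    simp only [bAssign, List.map]
    rw [if_neg (by omega)]
    simp [ih _ h]

theorem sum_nonneg_all_zero (l : List Int) (h : ∀ x ∈ l, 0 ≤ x) (hs : l.sum ≤ 0) :
    ∀ x ∈ l, x = 0 := by
  induction l with
  | nil => simp
  | cons a l ih =>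
    have ha := h a (by simp)
    have hl : 0 ≤ l.sum := List.sum_nonneg (fun x hx => h x (by simp [hx]))
    simp only [List.sum_cons] at hs
    intro x hx
    rcases List.mem_cons.mp hx with rfl | hx
    · omega
    · exact ih (fun y hy => h y (by simp [hy])) (by omega) x hx

theorem sCap_zero (caps : List Int) (h : ∀ c ∈ caps, 0 ≤ c) : sCap caps 0 = 0 := by
  induction caps with
  | nil => simp [sCap]
  | cons c cs ih =>
    have hc := h c (by simp)
    have := ih (fun c hc => h c (by simp [hc]))
    simp only [sCap, List.map, List.sum_cons] at *
    omega

theorem sCap_nonneg (caps : List Int) (q : Int) (hq : 0 ≤ q) (h : ∀ c ∈ caps, 0 ≤ c) :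
    0 ≤ sCap caps q := by
  induction caps with
  | nil => simp [sCap]
  | cons c cs ih =>
    have hc := h c (by simp)
    have := ih (fun c hc => h c (by simp [hc]))
    simp only [sCap, List.map, List.sum_cons] at *
    omega

theorem kPos_nonneg (caps : List Int) : 0 ≤ kPos caps := Int.natCast_nonneg _

theorem kPos_le_sum (caps : List Int) (h : ∀ c ∈ caps, 0 ≤ c) : kPos caps ≤ caps.sum := by
  induction caps with
  | nil => simp [kPos]
  | cons c cs ih =>
    have hc := h c (by simp)
    have := ih (fun c hc => h c (by simp [hc]))
    rw [kPos_cons]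
    simp only [List.sum_cons]
    split_ifs <;> omega

theorem sCap_shift (caps : List Int) (x : Int) (h : ∀ c ∈ caps, 0 ≤ c) (hx : 0 ≤ x) :
    sCap caps (x + 1) = kPos caps + sCap (caps.map (fun c => if 0 < c then c - 1 else c)) x := by
  induction caps with
  | nil => simp [sCap, kPos]
  | cons c cs ih =>
    have hc := h c (by simp)
    have hih := ih (fun c hc => h c (by simp [hc]))
    rw [kPos_cons]
    simp only [sCap, List.map, List.sum_cons] at *
    rw [hih]
    split_ifs <;> omega

theorem sum_dec (caps : List Int) (h : ∀ c ∈ caps, 0 ≤ c) :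
    (caps.map (fun c => if 0 < c then c - 1 else c)).sum = caps.sum - kPos caps := by
  induction caps with
  | nil => simp [kPos]
  | cons c cs ih =>
    have hc := h c (by simp)
    have hih := ih (fun c hc => h c (by simp [hc]))
    rw [kPos_cons]
    simp only [List.map, List.sum_cons]
    rw [hih]
    split_ifs <;> omega

theorem zipWith_sub_map_self (l : List Int) (g : Int → Int) :
    List.zipWith (fun p m => p - m) l (l.map g) = l.map (fun p => p - g p) := by
  induction l with
  | nil => simp
  | cons a l ih => simp [ih]

theorem zipWith_add_map_map (l : List Int) (f g : Int → Int) :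
    List.zipWith (fun a b => a + b) (l.map f) (l.map g) = l.map (fun x => f x + g x) := by
  induction l with
  | nil => simp
  | cons a l ih => simp [ih]

theorem sub_sub_assoc (a b c : List Int) :
    List.zipWith (fun p c => p - c) (List.zipWith (fun p m => p - m) a b) c =
      List.zipWith (fun p m => p - m) a (List.zipWith (fun a b => a + b) b c) := by
  induction a generalizing b c with
  | nil => simp
  | cons x a ih =>
    cases b with
    | nil => simp
    | cons y b =>
      cases c with
      | nil => simp
      | cons z c => simp only [List.zipWith_cons_cons, ih]; rw [sub_sub]

theorem zipWith_add_replicate_zero (b : List Int) :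
    List.zipWith (fun a b => a + b) b (List.replicate b.length 0) = b := by
  induction b with
  | nil => simp
  | cons a l ih => simp [List.replicate_succ, ih]

theorem mark_bounds (pads : List Int) (r : Int) (hp : ∀ p ∈ pads, 1 ≤ p ∧ p ≤ 17) :
    ∀ x ∈ List.zipWith (fun p m => p - m) pads (markC (pads.map (fun p => p - 1)) r),
      1 ≤ x ∧ x ≤ 17 := by
  induction pads generalizing r with
  | nil => simp
  | cons p ps ih =>
    have hph := hp p (by simp)
    have hpt : ∀ p ∈ ps, 1 ≤ p ∧ p ≤ 17 := fun p h => hp p (by simp [h])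
    intro x hx
    simp only [List.map_cons, markC] at hx
    split_ifs at hx with hcond
    · simp only [List.zipWith_cons_cons] at hx
      rcases List.mem_cons.mp hx with rfl | hx
      · omega
      · exact ih (r - 1) hpt x hx
    · simp only [List.zipWith_cons_cons] at hx
      rcases List.mem_cons.mp hx with rfl | hx
      · omega
      · exact ih r hpt x hx

theorem bAssign_zero (caps : List Int) (o : Int) (h : ∀ c ∈ caps, 0 ≤ c) :
    bAssign caps 0 o = markC caps o := by
  induction caps generalizing o with
  | nil => simp [bAssign, markC]
  | cons c cs ih =>
    have hc := h c (by simp)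
    have hih := fun o => ih o (fun c hc => h c (by simp [hc]))
    simp only [bAssign, markC]
    by_cases hcond : 0 < o ∧ 0 < c
    · rw [if_pos hcond, if_pos hcond]
      have : min (0 : Int) c + 1 = 1 := by omega
      rw [this, hih]
    · rw [if_neg hcond, if_neg hcond]
      have : min (0 : Int) c + 0 = 0 := by omega
      rw [this]
      have : o - 0 = o := by omega
      rw [this, hih]

theorem bAssign_shift (caps : List Int) (q : Int) (hq : 0 ≤ q) (h : ∀ c ∈ caps, 0 ≤ c) :
    ∀ rem : Int, bAssign caps (q + 1) rem =
      List.zipWith (fun a b => a + b) (caps.map (fun c => if 0 < c then 1 else 0))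
        (bAssign (caps.map (fun c => if 0 < c then c - 1 else c)) q rem) := by
  induction caps with
  | nil => simp [bAssign]
  | cons c cs ih =>
    have hc := h c (by simp)
    have hih := ih (fun c hc => h c (by simp [hc]))
    intro rem
    simp only [bAssign, List.map_cons, List.zipWith_cons_cons]
    have hbonus : (if 0 < rem ∧ q + 1 < c then (1:Int) else 0) =
        (if 0 < rem ∧ q < (if 0 < c then c - 1 else c) then (1:Int) else 0) := by
      split_ifs <;> omega
    rw [← hbonus, hih]
    congr 1
    split_ifs <;> omega

-- the q-scan of B computes the unique q with S(q) ≤ o < S(q+1)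
theorem scanQ (caps : List Int) (o : Int) (h0 : ∀ c ∈ caps, 0 ≤ c) (h16 : ∀ c ∈ caps, c ≤ 16)
    (ho : 0 ≤ o) (hlt : o < caps.sum) :
    0 ≤ ((PySem.List.pyRange 0 17 1).foldl
          (fun acc qq => if (caps.map (fun c => min qq c)).sum ≤ o then qq else acc) 0) ∧
    sCap caps ((PySem.List.pyRange 0 17 1).foldl
          (fun acc qq => if (caps.map (fun c => min qq c)).sum ≤ o then qq else acc) 0) ≤ o ∧
    ¬ sCap caps (((PySem.List.pyRange 0 17 1).foldl
          (fun acc qq => if (caps.map (fun c => min qq c)).sum ≤ o then qq else acc) 0) + 1) ≤ o := by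
  have hr : PySem.List.pyRange 0 17 1 = (List.range 17).map (fun i => (i : Int)) := by
    rw [PySem.List.pyRange_zero]; rfl
  rw [hr]
  have := scan_char caps o 16 (by rw [sCap_zero caps h0]; exact ho)
      (by rw [show ((16 : Nat) : Int) = 16 by norm_num, sCap_top caps h16]; omega)
  exact this

theorem bCuts_zero (caps : List Int) (h0 : ∀ c ∈ caps, 0 ≤ c) (h16 : ∀ c ∈ caps, c ≤ 16) :
    bCuts caps 0 = List.replicate caps.length 0 := by
  by_cases hs : caps.sum ≤ 0
  · have hall : ∀ c ∈ caps, c = 0 := sum_nonneg_all_zero caps h0 hs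
    simp only [bCuts, if_pos hs]
    exact List.eq_replicate_of_mem hall
  · simp only [bCuts, if_neg hs]
    obtain ⟨hQ0, hQa, hQb⟩ := scanQ caps 0 h0 h16 le_rfl (by omega)
    set Q := (PySem.List.pyRange 0 17 1).foldl
        (fun acc qq => if (caps.map (fun c => min qq c)).sum ≤ 0 then qq else acc) 0 with hQdef
    have hS0 : (caps.map (fun c => min Q c)).sum = 0 := by
      have h1 := sCap_nonneg caps Q hQ0 h0
      simp only [sCap] at h1 hQa
      omega
    rw [bAssign_rem_nonpos _ _ _ (by omega : (0:Int) - (caps.map (fun c => min Q c)).sum ≤ 0)]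
    have hall : ∀ x ∈ caps.map (fun c => min Q c), x = 0 := by
      apply sum_nonneg_all_zero
      · intro y hy
        obtain ⟨c', hc', rfl⟩ := List.mem_map.mp hy
        have := h0 c' hc'
        omega
      · omega
    rw [List.eq_replicate_of_mem hall, List.length_map]

-- the composite "pads after one pass, back to cap space" is `dec` of the caps
theorem newcaps_eq (pads : List Int) (o : Int)
    (hko : kPos (pads.map (fun p => p - 1)) ≤ o) :
    ((List.zipWith (fun p m => p - m) pads (markC (pads.map (fun p => p - 1)) o)).map
        (fun p => p - 1)) =
      (pads.map (fun p => p - 1)).map (fun c => if 0 < c then c - 1 else c) := by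
  rw [markC_ge _ _ hko, List.map_map, zipWith_sub_map_self, List.map_map, List.map_map]
  apply List.map_congr_left
  intro p _
  simp only [Function.comp]
  split_ifs <;> omega

-- one loop pass peels the marks off B's closed-form cuts
theorem cuts_step (pads : List Int) (o : Int)
    (hp : ∀ p ∈ pads, 1 ≤ p ∧ p ≤ 17) (ho : 0 < o)
    (hany : 1 ≤ kPos (pads.map (fun p => p - 1))) :
    bCuts (pads.map (fun p => p - 1)) o =
      List.zipWith (fun a b => a + b) (markC (pads.map (fun p => p - 1)) o)
        (bCuts ((List.zipWith (fun p m => p - m) pads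
                  (markC (pads.map (fun p => p - 1)) o)).map (fun p => p - 1))
               (o - min o (kPos (pads.map (fun p => p - 1))))) := by
  have hc0 : ∀ c ∈ pads.map (fun p => p - 1), 0 ≤ c := by
    intro c hc
    obtain ⟨p, hpm, rfl⟩ := List.mem_map.mp hc
    have := hp p hpm; omega
  have hc16 : ∀ c ∈ pads.map (fun p => p - 1), c ≤ 16 := by
    intro c hc
    obtain ⟨p, hpm, rfl⟩ := List.mem_map.mp hc
    have := hp p hpm; omega
  have hd0 : ∀ c ∈ (pads.map (fun p => p - 1)).map (fun c => if 0 < c then c - 1 else c), 0 ≤ c := by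
    intro c hc
    obtain ⟨c', hcm, rfl⟩ := List.mem_map.mp hc
    have := hc0 c' hcm
    split_ifs <;> omega
  have hd16 : ∀ c ∈ (pads.map (fun p => p - 1)).map (fun c => if 0 < c then c - 1 else c), c ≤ 16 := by
    intro c hc
    obtain ⟨c', hcm, rfl⟩ := List.mem_map.mp hc
    have := hc16 c' hcm
    split_ifs <;> omega
  by_cases hko : kPos (pads.map (fun p => p - 1)) ≤ o
  · have hmin : min o (kPos (pads.map (fun p => p - 1))) = kPos (pads.map (fun p => p - 1)) := by
      omega
    rw [hmin, newcaps_eq pads o hko, markC_ge _ _ hko]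
    by_cases hbig : (pads.map (fun p => p - 1)).sum ≤ o
    · have h1 : bCuts (pads.map (fun p => p - 1)) o = pads.map (fun p => p - 1) := by
        simp only [bCuts, if_pos hbig]
      have h2 : bCuts ((pads.map (fun p => p - 1)).map (fun c => if 0 < c then c - 1 else c))
          (o - kPos (pads.map (fun p => p - 1))) =
          (pads.map (fun p => p - 1)).map (fun c => if 0 < c then c - 1 else c) := by
        have := sum_dec (pads.map (fun p => p - 1)) hc0
        simp only [bCuts, if_pos (by omega : ((pads.map (fun p => p - 1)).map
          (fun c => if 0 < c then c - 1 else c)).sum ≤ o - kPos (pads.map (fun p => p - 1)))]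
      rw [h1, h2, zipWith_add_map_map]
      conv_lhs => rw [← List.map_id (List.map (fun p => p - 1) pads)]
      apply List.map_congr_left
      intro c _
      simp only [id]
      split_ifs <;> omega
    · obtain ⟨hQ0, hQa, hQb⟩ := scanQ (pads.map (fun p => p - 1)) o hc0 hc16 (by omega) (by omega)
      have hsum' := sum_dec (pads.map (fun p => p - 1)) hc0
      obtain ⟨hR0, hRa, hRb⟩ := scanQ ((pads.map (fun p => p - 1)).map (fun c => if 0 < c then c - 1 else c))
          (o - kPos (pads.map (fun p => p - 1))) hd0 hd16 (by omega) (by omega)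
      set caps := pads.map (fun p => p - 1) with hcaps
      set k := kPos caps with hkdef
      set Q := (PySem.List.pyRange 0 17 1).foldl
          (fun acc qq => if (caps.map (fun c => min qq c)).sum ≤ o then qq else acc) 0 with hQdef
      set R := (PySem.List.pyRange 0 17 1).foldl
          (fun acc qq => if ((caps.map (fun c => if 0 < c then c - 1 else c)).map
            (fun c => min qq c)).sum ≤ o - k then qq else acc) 0 with hRdef
      have hshift := fun (x : Int) (hx : 0 ≤ x) => sCap_shift caps x hc0 hx
      have hQR : Q = R + 1 := by
        apply sCap_unique caps o Q (R + 1) hQa hQb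
        · rw [hshift R hR0]
          simp only [sCap] at hRa ⊢
          omega
        · rw [show R + 1 + 1 = (R + 1) + 1 from rfl, hshift (R + 1) (by omega)]
          simp only [sCap] at hRb ⊢
          omega
      have hrem : o - (caps.map (fun c => min Q c)).sum =
          o - k - ((caps.map (fun c => if 0 < c then c - 1 else c)).map (fun c => min R c)).sum := by
        have := hshift R hR0
        rw [hQR]
        simp only [sCap] at this
        omega
      simp only [bCuts, if_neg hbig, if_neg (by omega : ¬ (caps.map
        (fun c => if 0 < c then c - 1 else c)).sum ≤ o - k)]
      rw [← hQdef, ← hRdef, hrem, hQR]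
      exact bAssign_shift caps R hR0 hc0 _
  · have hmin : min o (kPos (pads.map (fun p => p - 1))) = o := by omega
    rw [hmin]
    have hz : (o - o) = (0 : Int) := by omega
    rw [hz]
    have hb0 : ∀ c ∈ (List.zipWith (fun p m => p - m) pads
        (markC (pads.map (fun p => p - 1)) o)).map (fun p => p - 1), 0 ≤ c ∧ c ≤ 16 := by
      intro c hc
      obtain ⟨p, hpm, rfl⟩ := List.mem_map.mp hc
      have := mark_bounds pads o hp p hpm
      omega
    rw [bCuts_zero _ (fun c hc => (hb0 c hc).1) (fun c hc => (hb0 c hc).2)]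
    have hlen : ((List.zipWith (fun p m => p - m) pads
        (markC (pads.map (fun p => p - 1)) o)).map (fun p => p - 1)).length =
        (markC (pads.map (fun p => p - 1)) o).length := by
      simp [markC_length]
    rw [hlen, zipWith_add_replicate_zero]
    have hksum := kPos_le_sum (pads.map (fun p => p - 1)) hc0
    obtain ⟨hQ0, hQa, hQb⟩ := scanQ (pads.map (fun p => p - 1)) o hc0 hc16 (by omega) (by omega)
    set caps := pads.map (fun p => p - 1) with hcaps
    set Q := (PySem.List.pyRange 0 17 1).foldl
        (fun acc qq => if (caps.map (fun c => min qq c)).sum ≤ o then qq else acc) 0 with hQdef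
    have hQzero : Q = 0 := by
      apply sCap_unique caps o Q 0 hQa hQb
      · rw [sCap_zero caps hc0]; omega
      · rw [show (0:Int) + 1 = 1 from rfl, sCap_one caps hc0]; omega
    simp only [bCuts, if_neg (by omega : ¬ caps.sum ≤ o)]
    rw [← hQdef, hQzero]
    have : o - (caps.map (fun c => min (0:Int) c)).sum = o := by
      rw [show (caps.map (fun c => min (0:Int) c)).sum = sCap caps 0 from rfl, sCap_zero caps hc0]
      omega
    rw [this]
    exact bAssign_zero caps o hc0

theorem any_kPos (pads : List Int) (h : pads.any (fun p => decide (1 < p)) = true) :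
    1 ≤ kPos (pads.map (fun p => p - 1)) := by
  obtain ⟨p, hpm, hp1⟩ := List.any_eq_true.mp h
  have : 0 < (pads.map (fun p => p - 1)).countP (fun c => decide (0 < c)) := by
    apply List.countP_pos_iff.mpr
    exact ⟨p - 1, List.mem_map.mpr ⟨p, hpm, rfl⟩, by simp at hp1 ⊢; omega⟩
  unfold kPos
  exact_mod_cast this

theorem caps_nonneg_le16 (pads : List Int) (hp : ∀ p ∈ pads, 1 ≤ p ∧ p ≤ 17) :
    ∀ c ∈ pads.map (fun p => p - 1), 0 ≤ c ∧ c ≤ 16 := by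
  intro c hc
  obtain ⟨p, hpm, rfl⟩ := List.mem_map.mp hc
  have := hp p hpm; omega

theorem main_base (pads : List Int) (hp : ∀ p ∈ pads, 1 ≤ p ∧ p ≤ 17) :
    pads = List.zipWith (fun p c => p - c) pads (bCuts (pads.map (fun p => p - 1)) 0) := by
  rw [bCuts_zero _ (fun c hc => (caps_nonneg_le16 pads hp c hc).1)
        (fun c hc => (caps_nonneg_le16 pads hp c hc).2), List.length_map,
      zipWith_sub_replicate_zero]

theorem main_loop : ∀ (N : Nat) (pads : List Int) (o : Int), o.toNat ≤ N →
    (∀ p ∈ pads, 1 ≤ p ∧ p ≤ 17) → 0 ≤ o →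
    whileA pads o = List.zipWith (fun p c => p - c) pads (bCuts (pads.map (fun p => p - 1)) o) := by
  intro N
  induction N with
  | zero =>
    intro pads o hN hp ho
    have ho0 : o = 0 := by omega
    subst ho0
    rw [whileA, dif_neg (by simp)]
    exact main_base pads hp
  | succ N ih =>
    intro pads o hN hp ho
    rw [whileA]
    by_cases hcond : 0 < o ∧ pads.any (fun p => decide (1 < p)) = true
    · rw [dif_pos hcond, forPass_eq pads o hcond.1]
      have hany := any_kPos pads hcond.2
      have hk0 := kPos_nonneg (pads.map (fun p => p - 1))
      have hb : ∀ x ∈ List.zipWith (fun p m => p - m) pads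
          (markC (pads.map (fun p => p - 1)) o), 1 ≤ x ∧ x ≤ 17 := mark_bounds pads o hp
      have hnew0 : 0 ≤ o - min o (kPos (pads.map (fun p => p - 1))) := by omega
      have hnewN : (o - min o (kPos (pads.map (fun p => p - 1)))).toNat ≤ N := by omega
      rw [ih _ _ hnewN hb hnew0, sub_sub_assoc, ← cuts_step pads o hp hcond.1 hany]
    · rw [dif_neg hcond]
      by_cases ho0 : o = 0
      · subst ho0; exact main_base pads hp
      · have hanyf : pads.any (fun p => decide (1 < p)) = false := by
          rcases (not_and_or.mp hcond) with h | h
          · omega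
          · simpa using h
        have hczero : ∀ c ∈ pads.map (fun p => p - 1), c = 0 := by
          intro c hc
          obtain ⟨p, hpm, rfl⟩ := List.mem_map.mp hc
          have h1 := hp p hpm
          have h2 := List.any_eq_false.mp hanyf p hpm
          simp at h2
          omega
        have hrep : pads.map (fun p => p - 1) = List.replicate pads.length 0 := by
          rw [List.eq_replicate_of_mem hczero, List.length_map]
        have hsum : (pads.map (fun p => p - 1)).sum ≤ o := by
          rw [hrep]
          simp
          omega
        simp only [bCuts, if_pos hsum]
        rw [hrep, zipWith_sub_replicate_zero]

-- ===== VERDICT (by name: the statement is the Claim_ definition above) =====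
theorem sum_overflow (ls : List Int) :
    (ls.map (fun l => max (17 - l) 1)).sum + ls.sum - 17 * (ls.length : Int) =
    (ls.map (fun l => max (l - 16) 0)).sum := by
  induction ls with
  | nil => simp
  | cons l ls ih =>
    simp only [List.map, List.sum_cons, List.length_cons]
    push_cast
    push_cast at ih
    omega

theorem map_getD_range (xs : List Int) (d : Int) :
    (List.range xs.length).map (fun k => xs.getD k d) = xs := by
  apply List.ext_getElem (by simp)
  intro i h1 h2
  simp only [List.getElem_map, List.getElem_range]
  exact List.getD_eq_getElem xs d h2

theorem format_group_spec : Claim_equal_format_group := by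
  intro tokens cols hdom hpre
  unfold Spec_format_group
  have hpre' : (tokens.length : Int) = cols := hpre
  subst hpre'
  simp only [format_group, format_group_alt]
  rw [dif_pos trivial, dif_pos trivial]
  set L := List.map PySem.Str.len tokens with hL
  set P := List.map (fun l => max (17 - l) 1) L with hP
  set CB := List.map (fun t => max (17 - 1 - PySem.Str.len t) 0) tokens with hCB
  set OB := (List.map (fun t => max (PySem.Str.len t - (17 - 1)) 0) tokens).sum with hOBdef
  have hLn : L.length = tokens.length := by rw [hL, List.length_map]
  have hPn : P.length = tokens.length := by rw [hP, List.length_map, hLn]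
  have hCBn : CB.length = tokens.length := by rw [hCB, List.length_map]
  have hl0 : ∀ l ∈ L, 0 ≤ l := by
    intro l hl
    rw [hL] at hl
    obtain ⟨t, _, rfl⟩ := List.mem_map.mp hl
    simp
  have hp : ∀ p ∈ P, 1 ≤ p ∧ p ≤ 17 := by
    intro p hpm
    rw [hP] at hpm
    obtain ⟨l, hlm, rfl⟩ := List.mem_map.mp hpm
    have := hl0 l hlm
    omega
  have hcapsEq : P.map (fun p => p - 1) = CB := by
    rw [hP, hCB, hL, List.map_map, List.map_map]
    apply List.map_congr_left
    intro t _
    have h0 : (0 : Int) ≤ PySem.Str.len t := by simp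
    simp only [Function.comp]
    omega
  have hOBform : OB = (L.map (fun l => max (l - 16) 0)).sum := by
    rw [hOBdef, hL, List.map_map]
    rfl
  have hOB0 : 0 ≤ OB := by
    rw [hOBform]
    apply List.sum_nonneg
    intro x hx
    obtain ⟨l, _, rfl⟩ := List.mem_map.mp hx
    omega
  have hOA : ((List.map (fun i => PySem.List.pyGetD P i 0 + PySem.List.pyGetD L i 0)
        (PySem.List.pyRange 0 (tokens.length : Int) 1)).sum
      + 2 * ((tokens.length : Int) - 1) -
      ((tokens.length : Int) * 17 + 2 * ((tokens.length : Int) - 1))) = OB := by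
    rw [PySem.List.pyRange_zero_nat tokens.length, List.map_map]
    simp only [Function.comp_def, PySem.List.pyGetD_natCast]
    rw [PySem.List.sum_map_add_int]
    have e1 : ((List.range tokens.length).map (fun k => P.getD k 0)).sum = P.sum := by
      rw [← hPn, map_getD_range]
    have e2 : ((List.range tokens.length).map (fun k => L.getD k 0)).sum = L.sum := by
      rw [← hLn, map_getD_range]
    rw [e1, e2]
    have hso := sum_overflow L
    rw [hLn] at hso
    rw [hOBform, hP]
    omega
  rw [hOA, main_loop OB.toNat P OB le_rfl hp hOB0, hcapsEq]
  congr 1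
  rw [PySem.List.pyRange_zero_nat tokens.length, List.map_map]
  have hcutlen : (bCuts CB OB).length = tokens.length := by rw [bCuts_length, hCBn]
  apply List.ext_getElem
  · simp [List.length_zip, hcutlen, hPn]
  · intro i h1 h2
    have hi : i < tokens.length := by simpa using h1
    have hiz : i < (List.zipWith (fun p c => p - c) P (bCuts CB OB)).length := by
      simp [List.length_zipWith, hcutlen, hPn]; omega
    simp only [List.getElem_map, List.getElem_range, Function.comp_def,
      PySem.List.pyGetD_natCast, List.getElem_zip]
    rw [List.getD_eq_getElem _ _ hiz, List.getD_eq_getElem tokens "" hi]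
    simp only [List.getElem_zipWith]
    have hPi : P[i]'(by omega) = max (17 - PySem.Str.len (tokens[i]'hi)) 1 := by
      simp [hP, hL, List.getElem_map]
    rw [hPi]
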